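-- pv_equiv track=rewrite | github.com/prawinkumar1506/mhcb-agents | agents/conversation_manager.py | _determine_next_agent
-- ===== SOURCE A (Python) =====
-- from typing import Dict, List, Any
--
-- def _determine_next_agent(tags: List[str], emotional_state: str) -> str:
--     """Determine the most appropriate next agent based on user needs"""
--
--     # Crisis situations always go to booking agent
--     if emotional_state == "crisis" or any(tag in ["crisis", "suicidal", "self_harm"] for tag in tags):
--         return "booking_agent"
--
--     # Severe conditions need psychiatrist consultation
--     if any(tag in ["severe_depression", "bipolar", "psychosis", "medication"] for tag in tags):
--         return "psychiatrist"
--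
--     # CBT-appropriate conditions
--     if any(tag in ["anxiety", "depression", "negative_thoughts", "panic", "phobia"] for tag in tags):
--         return "cbt_therapist"
--
--     # Mindfulness and stress management
--     if any(tag in ["stress", "sleep", "focus", "lifestyle", "mindfulness"] for tag in tags):
--         return "mindfulness_coach"
--
--     # Relationship issues
--     if any(tag in ["relationships", "family", "workplace", "communication"] for tag in tags):
--         return "relationship_counselor"
--
--     # Default to conversation manager for general support
--     return "conversation_manager"
-- ===== SOURCE B (Python) =====
-- # Inverted index + min-reduction: one keyword->(priority, agent) map, a single
-- # pass over tags keeps the best (lowest-priority) match, instead of staged scans.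
-- AGENT_OF_TAG = {}
-- for _prio, _agent, _words in [
--     (0, "booking_agent", ["crisis", "suicidal", "self_harm"]),
--     (1, "psychiatrist", ["severe_depression", "bipolar", "psychosis", "medication"]),
--     (2, "cbt_therapist", ["anxiety", "depression", "negative_thoughts", "panic", "phobia"]),
--     (3, "mindfulness_coach", ["stress", "sleep", "focus", "lifestyle", "mindfulness"]),
--     (4, "relationship_counselor", ["relationships", "family", "workplace", "communication"]),
-- ]:
--     for _w in _words:
--         AGENT_OF_TAG[_w] = (_prio, _agent)
--
-- def _determine_next_agent(tags, emotional_state):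
--     best = (0, "booking_agent") if emotional_state == "crisis" else (5, "conversation_manager")
--     for tag in tags:
--         cand = AGENT_OF_TAG.get(tag)
--         if cand is not None and cand[0] < best[0]:
--             best = cand
--     return best[1]
-- ===== Notes on version B (the rewrite author's own statement) =====
-- stated objective: alternative
-- what changed: Replaces the five staged any(...) scans over tags with an inverted keyword->(priority, agent) index and a single pass over tags that keeps the minimum-priority match (a min-reduction), with the crisis emotional_state folded into the initial accumulator.
import Mathlib
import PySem

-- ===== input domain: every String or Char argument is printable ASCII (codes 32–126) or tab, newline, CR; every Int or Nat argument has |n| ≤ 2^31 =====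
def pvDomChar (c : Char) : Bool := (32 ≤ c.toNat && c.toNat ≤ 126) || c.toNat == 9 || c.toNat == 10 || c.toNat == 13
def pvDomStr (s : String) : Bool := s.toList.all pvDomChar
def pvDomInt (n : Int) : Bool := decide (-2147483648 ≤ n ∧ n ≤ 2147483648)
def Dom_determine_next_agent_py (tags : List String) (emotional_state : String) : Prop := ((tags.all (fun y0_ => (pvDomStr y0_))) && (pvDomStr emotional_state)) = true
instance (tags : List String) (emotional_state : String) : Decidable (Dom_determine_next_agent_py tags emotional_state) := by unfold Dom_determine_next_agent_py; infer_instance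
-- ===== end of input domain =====

-- B replaces A's five staged any(...) scans by an inverted keyword -> (priority, agent)
-- index and a single min-reduction pass over tags (alternative decomposition; same value).

-- ===== PORT A =====
-- literal transliteration of A's early-return branch chain
def determine_next_agent_py (tags : List String) (emotional_state : String) : String :=
  if emotional_state == "crisis" || tags.any (fun tag => (["crisis", "suicidal", "self_harm"] : List String).contains tag) then
    "booking_agent"
  else if tags.any (fun tag => (["severe_depression", "bipolar", "psychosis", "medication"] : List String).contains tag) then
    "psychiatrist"
  else if tags.any (fun tag => (["anxiety", "depression", "negative_thoughts", "panic", "phobia"] : List String).contains tag) then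
    "cbt_therapist"
  else if tags.any (fun tag => (["stress", "sleep", "focus", "lifestyle", "mindfulness"] : List String).contains tag) then
    "mindfulness_coach"
  else if tags.any (fun tag => (["relationships", "family", "workplace", "communication"] : List String).contains tag) then
    "relationship_counselor"
  else
    "conversation_manager"

-- ===== PORT B =====
-- Source B's module-level AGENT_OF_TAG dict (keyword -> (priority, agent)), in build order
def pvAgentOfTag : PySem.Dict String (Int × String) := PySem.Dict.mk
  [ ("crisis", (0, "booking_agent")), ("suicidal", (0, "booking_agent")), ("self_harm", (0, "booking_agent")),
    ("severe_depression", (1, "psychiatrist")), ("bipolar", (1, "psychiatrist")), ("psychosis", (1, "psychiatrist")), ("medication", (1, "psychiatrist")),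
    ("anxiety", (2, "cbt_therapist")), ("depression", (2, "cbt_therapist")), ("negative_thoughts", (2, "cbt_therapist")), ("panic", (2, "cbt_therapist")), ("phobia", (2, "cbt_therapist")),
    ("stress", (3, "mindfulness_coach")), ("sleep", (3, "mindfulness_coach")), ("focus", (3, "mindfulness_coach")), ("lifestyle", (3, "mindfulness_coach")), ("mindfulness", (3, "mindfulness_coach")),
    ("relationships", (4, "relationship_counselor")), ("family", (4, "relationship_counselor")), ("workplace", (4, "relationship_counselor")), ("communication", (4, "relationship_counselor")) ]

-- Source B's single pass: keep the lowest-priority match seen so far ('cand[0] < best[0]')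
def determine_next_agent_py_alt (tags : List String) (emotional_state : String) : String :=
  let best0 : Int × String :=
    if emotional_state == "crisis" then (0, "booking_agent") else (5, "conversation_manager")
  (tags.foldl (fun best tag =>
      match pvAgentOfTag.get? tag with
      | some cand => if cand.1 < best.1 then cand else best
      | none => best) best0).2

-- ===== PRECONDITION & SPEC =====
def Spec_determine_next_agent_py (tags : List String) (emotional_state : String) (out : String) : Prop := out = determine_next_agent_py_alt tags emotional_state
instance (tags : List String) (emotional_state : String) (out : String) : Decidable (Spec_determine_next_agent_py tags emotional_state out) := by unfold Spec_determine_next_agent_py; infer_instance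

-- ===== CLAIM (what is proved, stated in full; the proofs are below) =====
def Claim_equal_determine_next_agent_py : Prop := ∀ (tags : List String) (emotional_state : String), Dom_determine_next_agent_py tags emotional_state → Spec_determine_next_agent_py tags emotional_state (determine_next_agent_py tags emotional_state)

-- ===== LEMMAS AND PROOFS =====

-- priority of a tag (5 = unmatched), and the canonical (priority, agent) pair
def pvP (t : String) : Int :=
  match pvAgentOfTag.get? t with
  | some c => c.1
  | none => 5

def pvPair (i : Int) : Int × String :=
  (i, if i ≤ 0 then "booking_agent"
      else if i = 1 then "psychiatrist"
      else if i = 2 then "cbt_therapist"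
      else if i = 3 then "mindfulness_coach"
      else if i = 4 then "relationship_counselor"
      else "conversation_manager")

-- running minimum of tag priorities, started at i
def pvM (i : Int) (tags : List String) : Int :=
  tags.foldl (fun a t => min a (pvP t)) i

-- any value held in AGENT_OF_TAG is the canonical pair of its priority, in range
theorem pv_get_cases (t : String) (c : Int × String) (h : pvAgentOfTag.get? t = some c) :
    c = pvPair c.1 ∧ 0 ≤ c.1 ∧ c.1 ≤ 5 := by
  have hm := PySem.Dict.mem_items_of_get?_eq_some pvAgentOfTag h
  simp only [pvAgentOfTag] at hm
  simp only [List.mem_cons, List.not_mem_nil, or_false, Prod.mk.injEq] at hm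
  rcases hm with ⟨_,h⟩|⟨_,h⟩|⟨_,h⟩|⟨_,h⟩|⟨_,h⟩|⟨_,h⟩|⟨_,h⟩|⟨_,h⟩|⟨_,h⟩|⟨_,h⟩|⟨_,h⟩|⟨_,h⟩|⟨_,h⟩|⟨_,h⟩|⟨_,h⟩|⟨_,h⟩|⟨_,h⟩|⟨_,h⟩|⟨_,h⟩|⟨_,h⟩|⟨_,h⟩ <;>
    subst h <;> exact ⟨rfl, by norm_num, by norm_num⟩

theorem pvP_range (t : String) : 0 ≤ pvP t ∧ pvP t ≤ 5 := by
  unfold pvP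
  cases h : pvAgentOfTag.get? t with
  | none => norm_num
  | some c => exact (pv_get_cases t c h).2

-- one step of B's loop, on a canonical accumulator
theorem pv_step (t : String) (i : Int) (hi : i ≤ 5) :
    (match pvAgentOfTag.get? t with
     | some cand => if cand.1 < (pvPair i).1 then cand else pvPair i
     | none => pvPair i) = pvPair (min i (pvP t)) := by
  cases h : pvAgentOfTag.get? t with
  | none =>
      have hp : pvP t = 5 := by simp [pvP, h]
      rw [hp, min_eq_left hi]
  | some c =>
      have hp : pvP t = c.1 := by simp [pvP, h]
      obtain ⟨hc, h0, h5⟩ := pv_get_cases t c h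
      rw [hp]
      simp only [pvPair]
      by_cases hlt : c.1 < i
      · rw [if_pos hlt, min_eq_right hlt.le, ← pvPair, ← hc]
      · rw [if_neg hlt, min_eq_left (by omega), ← pvPair]

-- B's whole loop computes the canonical pair of the running minimum priority
theorem pv_fold (tags : List String) (i : Int) (hi : i ≤ 5) :
    (tags.foldl (fun best tag =>
        match pvAgentOfTag.get? tag with
        | some cand => if cand.1 < best.1 then cand else best
        | none => best) (pvPair i)) = pvPair (pvM i tags) := by
  induction tags generalizing i with
  | nil => simp [pvM]
  | cons t r ih =>
      have h := pv_step t i hi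
      simp only [List.foldl_cons, pvM] at *
      rw [h]
      exact ih (min i (pvP t)) (le_trans (min_le_left _ _) hi)

-- membership in A's keyword list at level k ↔ priority k
theorem pv_mem_iff (t : String) (k : Int) (hk : k = 0 ∨ k = 1 ∨ k = 2 ∨ k = 3 ∨ k = 4) :
    ((if k = 0 then (["crisis", "suicidal", "self_harm"] : List String)
      else if k = 1 then ["severe_depression", "bipolar", "psychosis", "medication"]
      else if k = 2 then ["anxiety", "depression", "negative_thoughts", "panic", "phobia"]
      else if k = 3 then ["stress", "sleep", "focus", "lifestyle", "mindfulness"]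
      else ["relationships", "family", "workplace", "communication"]).contains t) = true ↔ pvP t = k := by
  cases h : pvAgentOfTag.get? t with
  | none =>
      have hp : pvP t = 5 := by simp [pvP, h]
      have hkey : ¬ t ∈ pvAgentOfTag.keys := by
        rw [← PySem.Dict.get?_eq_none_iff_not_mem_keys]; exact h
      simp [pvAgentOfTag] at hkey
      push_neg at hkey
      obtain ⟨c1,c2,c3,c4,c5,c6,c7,c8,c9,c10,c11,c12,c13,c14,c15,c16,c17,c18,c19,c20,c21⟩ := hkey
      rcases hk with hk | hk | hk | hk | hk <;> subst hk
      all_goals simp [List.contains_eq_mem, hp, c1,c2,c3,c4,c5,c6,c7,c8,c9,c10,c11,c12,c13,c14,c15,c16,c17,c18,c19,c20,c21]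
  | some c =>
      have hp : pvP t = c.1 := by simp [pvP, h]
      have hm := PySem.Dict.mem_items_of_get?_eq_some pvAgentOfTag h
      simp only [pvAgentOfTag] at hm
      simp only [List.mem_cons, List.not_mem_nil, or_false, Prod.mk.injEq] at hm
      rcases hm with ⟨ht,hc⟩|⟨ht,hc⟩|⟨ht,hc⟩|⟨ht,hc⟩|⟨ht,hc⟩|⟨ht,hc⟩|⟨ht,hc⟩|⟨ht,hc⟩|⟨ht,hc⟩|⟨ht,hc⟩|⟨ht,hc⟩|⟨ht,hc⟩|⟨ht,hc⟩|⟨ht,hc⟩|⟨ht,hc⟩|⟨ht,hc⟩|⟨ht,hc⟩|⟨ht,hc⟩|⟨ht,hc⟩|⟨ht,hc⟩|⟨ht,hc⟩ <;>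
        subst ht <;> subst hc <;>
        rcases hk with hk | hk | hk | hk | hk <;> subst hk <;>
        simp [hp]

-- A's any-scan at level k ↔ some tag has priority k
theorem pv_any_iff (tags : List String) (k : Int)
    (hk : k = 0 ∨ k = 1 ∨ k = 2 ∨ k = 3 ∨ k = 4) (lst : List String)
    (hl : lst = (if k = 0 then (["crisis", "suicidal", "self_harm"] : List String)
      else if k = 1 then ["severe_depression", "bipolar", "psychosis", "medication"]
      else if k = 2 then ["anxiety", "depression", "negative_thoughts", "panic", "phobia"]
      else if k = 3 then ["stress", "sleep", "focus", "lifestyle", "mindfulness"]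
      else ["relationships", "family", "workplace", "communication"])) :
    (tags.any (fun tag => lst.contains tag) = true) ↔ ∃ t ∈ tags, pvP t = k := by
  subst hl
  simp only [List.any_eq_true]
  constructor
  · rintro ⟨t, ht, hcont⟩
    exact ⟨t, ht, (pv_mem_iff t k hk).mp hcont⟩
  · rintro ⟨t, ht, hp⟩
    exact ⟨t, ht, (pv_mem_iff t k hk).mpr hp⟩

theorem pvM_le_init (tags : List String) (i : Int) : pvM i tags ≤ i := by
  induction tags generalizing i with
  | nil => simp [pvM]
  | cons t r ih =>
      simp only [pvM, List.foldl_cons] at *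
      exact le_trans (ih (min i (pvP t))) (min_le_left _ _)

theorem pvM_le_mem (tags : List String) (i : Int) (t : String) (ht : t ∈ tags) :
    pvM i tags ≤ pvP t := by
  induction tags generalizing i with
  | nil => cases ht
  | cons u r ih =>
      simp only [pvM, List.foldl_cons] at *
      rcases List.mem_cons.mp ht with h | h
      · subst h
        exact le_trans (pvM_le_init r _) (min_le_right _ _)
      · exact ih (min i (pvP u)) h

theorem pvM_cases (tags : List String) (i : Int) :
    pvM i tags = i ∨ ∃ t ∈ tags, pvP t = pvM i tags := by
  induction tags generalizing i with
  | nil => left; simp [pvM]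
  | cons u r ih =>
      have hrec : pvM i (u :: r) = pvM (min i (pvP u)) r := by
        simp [pvM]
      rw [hrec]
      rcases ih (min i (pvP u)) with h | ⟨t, ht, hpt⟩
      · rw [h]
        by_cases hle : i ≤ pvP u
        · left; exact min_eq_left hle
        · right
          exact ⟨u, List.mem_cons_self, (min_eq_right (by omega)).symm⟩
      · right; exact ⟨t, List.mem_cons_of_mem _ ht, hpt⟩

theorem pvM_nonneg (tags : List String) (i : Int) (hi : 0 ≤ i) : 0 ≤ pvM i tags := by
  induction tags generalizing i with
  | nil => simpa [pvM]
  | cons t r ih =>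
      simp only [pvM, List.foldl_cons] at *
      exact ih _ (le_min hi (pvP_range t).1)

-- ===== VERDICT (by name: the statement is the Claim_ definition above) =====
theorem determine_next_agent_py_spec : Claim_equal_determine_next_agent_py := by
  intro tags es _
  unfold Spec_determine_next_agent_py determine_next_agent_py determine_next_agent_py_alt
  by_cases hes : es == "crisis"
  · -- crisis state: B's accumulator starts at pvPair 0 and stays 0
    simp only [hes, Bool.true_or, if_true]
    have h0 : (((0 : Int), "booking_agent") : Int × String) = pvPair 0 := by
      simp [pvPair]
    rw [h0, pv_fold tags 0 (by norm_num)]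
    have : pvM 0 tags = 0 := le_antisymm (pvM_le_init tags 0) (pvM_nonneg tags 0 le_rfl)
    simp [this, pvPair]
  · simp only [Bool.not_eq_true] at hes
    simp only [hes, Bool.false_or]
    have h5 : (((5 : Int), "conversation_manager") : Int × String) = pvPair 5 := by
      simp [pvPair]
    rw [h5]
    simp only [Bool.false_eq_true, if_false]
    rw [pv_fold tags 5 le_rfl]
    set m := pvM 5 tags with hm
    have hupper : m ≤ 5 := pvM_le_init tags 5
    have hlower : 0 ≤ m := pvM_nonneg tags 5 (by norm_num)
    have e0 := pv_any_iff tags 0 (by tauto) (["crisis", "suicidal", "self_harm"]) (by norm_num)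
    have e1 := pv_any_iff tags 1 (by tauto) (["severe_depression", "bipolar", "psychosis", "medication"]) (by norm_num)
    have e2 := pv_any_iff tags 2 (by tauto) (["anxiety", "depression", "negative_thoughts", "panic", "phobia"]) (by norm_num)
    have e3 := pv_any_iff tags 3 (by tauto) (["stress", "sleep", "focus", "lifestyle", "mindfulness"]) (by norm_num)
    have e4 := pv_any_iff tags 4 (by tauto) (["relationships", "family", "workplace", "communication"]) (by norm_num)
    have hmem : ∀ t ∈ tags, m ≤ pvP t := fun t ht => pvM_le_mem tags 5 t ht
    have hwit : m < 5 → ∃ t ∈ tags, pvP t = m := by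
      intro hlt
      rcases pvM_cases tags 5 with h | h
      · omega
      · exact h
    split_ifs with b0 b1 b2 b3 b4
    · obtain ⟨t, ht, hp⟩ := e0.mp b0
      have : m = 0 := le_antisymm (hp ▸ hmem t ht) hlower
      simp [this, pvPair]
    · obtain ⟨t, ht, hp⟩ := e1.mp b1
      have hle1 : m ≤ 1 := hp ▸ hmem t ht
      have : m = 1 := by
        rcases lt_or_eq_of_le hle1 with hlt | h
        · exact absurd (e0.mpr (by obtain ⟨u, hu, hpu⟩ := hwit (by omega); exact ⟨u, hu, by omega⟩)) b0
        · exact h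
      simp [this, pvPair]
    · obtain ⟨t, ht, hp⟩ := e2.mp b2
      have hle2 : m ≤ 2 := hp ▸ hmem t ht
      have : m = 2 := by
        rcases lt_or_eq_of_le hle2 with hlt | h
        · exfalso
          obtain ⟨u, hu, hpu⟩ := hwit (by omega)
          rcases (by omega : m = 0 ∨ m = 1) with h' | h'
          · exact b0 (e0.mpr ⟨u, hu, by omega⟩)
          · exact b1 (e1.mpr ⟨u, hu, by omega⟩)
        · exact h
      simp [this, pvPair]
    · obtain ⟨t, ht, hp⟩ := e3.mp b3
      have hle3 : m ≤ 3 := hp ▸ hmem t ht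
      have : m = 3 := by
        rcases lt_or_eq_of_le hle3 with hlt | h
        · exfalso
          obtain ⟨u, hu, hpu⟩ := hwit (by omega)
          rcases (by omega : m = 0 ∨ m = 1 ∨ m = 2) with h' | h' | h'
          · exact b0 (e0.mpr ⟨u, hu, by omega⟩)
          · exact b1 (e1.mpr ⟨u, hu, by omega⟩)
          · exact b2 (e2.mpr ⟨u, hu, by omega⟩)
        · exact h
      simp [this, pvPair]
    · obtain ⟨t, ht, hp⟩ := e4.mp b4
      have hle4 : m ≤ 4 := hp ▸ hmem t ht
      have : m = 4 := by
        rcases lt_or_eq_of_le hle4 with hlt | h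
        · exfalso
          obtain ⟨u, hu, hpu⟩ := hwit (by omega)
          rcases (by omega : m = 0 ∨ m = 1 ∨ m = 2 ∨ m = 3) with h' | h' | h' | h'
          · exact b0 (e0.mpr ⟨u, hu, by omega⟩)
          · exact b1 (e1.mpr ⟨u, hu, by omega⟩)
          · exact b2 (e2.mpr ⟨u, hu, by omega⟩)
          · exact b3 (e3.mpr ⟨u, hu, by omega⟩)
        · exact h
      simp [this, pvPair]
    · have : m = 5 := by
        rcases lt_or_eq_of_le hupper with hlt | h
        · exfalso
          obtain ⟨u, hu, hpu⟩ := hwit hlt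
          rcases (by omega : m = 0 ∨ m = 1 ∨ m = 2 ∨ m = 3 ∨ m = 4) with h' | h' | h' | h' | h'
          · exact b0 (e0.mpr ⟨u, hu, by omega⟩)
          · exact b1 (e1.mpr ⟨u, hu, by omega⟩)
          · exact b2 (e2.mpr ⟨u, hu, by omega⟩)
          · exact b3 (e3.mpr ⟨u, hu, by omega⟩)
          · exact b4 (e4.mpr ⟨u, hu, by omega⟩)
        · exact h
      simp [this, pvPair]
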